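-- pv_equiv track=rewrite | github.com/santoshpalla27/devops-app | tester-service/assertions/state_assertions.py | assert_final_state
-- ===== SOURCE A (Python) =====
-- from typing import List, Dict
--
-- def assert_final_state(
--
--     state_history: List[Dict],
--     system: str,
--     expected_state: str
-- ) -> tuple[bool, str]:
--     """Verify system ended in expected state."""
--     system_states = [r for r in state_history if r['system'] == system]
--
--     if not system_states:
--         return False, f"❌ No state history for {system}"
--
--     final_state = system_states[-1]['state']
--
--     if final_state == expected_state:
--         return True, f"✅ Final state is {expected_state}"
--
--     return False, f"❌ Expected final state {expected_state}, got {final_state}"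
-- ===== SOURCE B (Python) =====
-- def assert_final_state(state_history, system, expected_state):
--     """Verify system ended in expected state (backward early-exit scan, no intermediate list)."""
--     for r in reversed(state_history):
--         if r['system'] == system:
--             final_state = r['state']
--             if final_state == expected_state:
--                 return True, f"✅ Final state is {expected_state}"
--             return False, f"❌ Expected final state {expected_state}, got {final_state}"
--     return False, f"❌ No state history for {system}"
-- ===== Notes on version B (the rewrite author's own statement) =====
-- stated objective: simpler
-- what changed: Replaces the filter-into-a-list-then-index-[-1] pass with a single backward scan that returns at the first (i.e. last) record for the system, maintaining no intermediate list.
import Mathlib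
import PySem

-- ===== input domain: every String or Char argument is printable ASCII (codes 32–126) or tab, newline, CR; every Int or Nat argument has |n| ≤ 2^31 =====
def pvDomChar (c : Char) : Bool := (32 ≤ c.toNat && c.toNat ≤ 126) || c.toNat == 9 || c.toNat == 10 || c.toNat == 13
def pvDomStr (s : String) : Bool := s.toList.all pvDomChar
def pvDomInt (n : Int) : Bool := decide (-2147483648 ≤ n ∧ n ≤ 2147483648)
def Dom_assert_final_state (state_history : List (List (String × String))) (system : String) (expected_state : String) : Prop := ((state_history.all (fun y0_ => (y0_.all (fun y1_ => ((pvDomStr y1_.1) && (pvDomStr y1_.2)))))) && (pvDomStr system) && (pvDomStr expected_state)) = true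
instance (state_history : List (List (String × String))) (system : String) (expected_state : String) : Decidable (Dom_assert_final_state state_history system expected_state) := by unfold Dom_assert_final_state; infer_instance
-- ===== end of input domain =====

-- B replaces A's filter-into-a-list-then-[-1] pass with a single backward early-exit scan (simpler; same return values).

-- ===== PORT A =====
-- A: build system_states = [r for r in state_history if r['system'] == system], branch on emptiness, read [-1]['state'].
-- dict lookup r['system'] is ported as assoc-list first-match lookup; Pre_ guarantees the key is present wherever A reads it.
def assert_final_state (state_history : List (List (String × String))) (system : String) (expected_state : String) : Bool × String :=
  let system_states := state_history.filter (fun r => (List.lookup "system" r).getD "" == system)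
  match system_states.getLast? with
  | none => (false, "❌ No state history for " ++ system)
  | some last =>
    let final_state := (List.lookup "state" last).getD ""
    if final_state == expected_state then (true, "✅ Final state is " ++ expected_state)
    else (false, "❌ Expected final state " ++ expected_state ++ ", got " ++ final_state)

-- ===== PORT B =====
-- B: scan the history backwards, return at the first record for `system`.
def afsScan (system expected_state : String) : List (List (String × String)) → Bool × String
  | [] => (false, "❌ No state history for " ++ system)
  | r :: rest =>
    if (List.lookup "system" r).getD "" == system then
      let final_state := (List.lookup "state" r).getD ""
      if final_state == expected_state then (true, "✅ Final state is " ++ expected_state)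
      else (false, "❌ Expected final state " ++ expected_state ++ ", got " ++ final_state)
    else afsScan system expected_state rest

def assert_final_state_alt (state_history : List (List (String × String))) (system : String) (expected_state : String) : Bool × String :=
  afsScan system expected_state state_history.reverse

-- ===== PRECONDITION & SPEC =====
-- Pre_ excludes exactly the inputs where Python A raises KeyError: a record without a 'system' key,
-- or a last matching record without a 'state' key.
def Pre_assert_final_state (state_history : List (List (String × String))) (system : String) (expected_state : String) : Prop :=
  (state_history.all (fun r => (List.lookup "system" r).isSome)
    && ((state_history.filter (fun r => (List.lookup "system" r).getD "" == system)).getLast?.all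
          (fun r => (List.lookup "state" r).isSome))) = true
instance (state_history : List (List (String × String))) (system : String) (expected_state : String) : Decidable (Pre_assert_final_state state_history system expected_state) := by unfold Pre_assert_final_state; infer_instance

def pvWitness_assert_final_state : (List (List (String × String))) × String × String :=
  ([[("system", "db"), ("state", "up")], [("system", "db"), ("state", "down")]], "db", "down")

def Spec_assert_final_state (state_history : List (List (String × String))) (system : String) (expected_state : String) (out : Bool × String) : Prop := out = assert_final_state_alt state_history system expected_state
instance (state_history : List (List (String × String))) (system : String) (expected_state : String) (out : Bool × String) : Decidable (Spec_assert_final_state state_history system expected_state out) := by unfold Spec_assert_final_state; infer_instance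

-- ===== CLAIM (what is proved, stated in full; the proofs are below) =====
def Claim_equal_assert_final_state : Prop := ∀ (state_history : List (List (String × String))) (system : String) (expected_state : String), Dom_assert_final_state state_history system expected_state → Pre_assert_final_state state_history system expected_state → Spec_assert_final_state state_history system expected_state (assert_final_state state_history system expected_state)

-- ===== LEMMAS AND PROOFS =====

-- B's backward scan, read as a statement about the filtered list of the scanned order.
theorem afsScan_eq_filter_head (system expected_state : String)
    (l : List (List (String × String))) :
    afsScan system expected_state l =
      match (l.filter (fun r => (List.lookup "system" r).getD "" == system)).head? with
      | none => (false, "❌ No state history for " ++ system)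
      | some r =>
        let final_state := (List.lookup "state" r).getD ""
        if final_state == expected_state then (true, "✅ Final state is " ++ expected_state)
        else (false, "❌ Expected final state " ++ expected_state ++ ", got " ++ final_state) := by
  induction l with
  | nil => rfl
  | cons r rest ih =>
    by_cases h : ((List.lookup "system" r).getD "" == system) = true
    · simp [afsScan, h]
    · simp only [Bool.not_eq_true] at h
      simp [afsScan, h, ih]

-- ===== VERDICT (by name: the statement is the Claim_ definition above) =====
theorem assert_final_state_spec : Claim_equal_assert_final_state := by
  intro sh sys exp _ _
  unfold Spec_assert_final_state assert_final_state assert_final_state_alt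
  rw [afsScan_eq_filter_head, List.filter_reverse, List.head?_reverse]
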